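-- pv_equiv track=rewrite | github.com/pypi-data/pypi-mirror-321 | packages/annolid/annolid-1.2.2-py3-none-any.whl/annolid/detector/countgd/run.py | _get_ind_to_filter
-- ===== SOURCE A (Python) =====
-- def _get_ind_to_filter(text: str, word_ids: list, keywords: str) -> list:
--     """Determines the indices of word IDs to filter based on keywords.
--
--     Args:
--         text: The input text prompt.
--         word_ids: List of word IDs from the model output.
--         keywords: Comma-separated keywords to filter.
--
--     Returns:
--         A list of indices to filter.
--     """
--     if not keywords:
--         return list(range(len(word_ids)))
--
--     input_words = text.split()
--     keywords_list = [keyword.strip() for keyword in keywords.split(",")]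
--
--     word_inds = []
--     for keyword in keywords_list:
--         try:
--             start_index = 0 if not word_inds else word_inds[-1] + 1
--             ind = input_words.index(keyword, start_index)
--             word_inds.append(ind)
--         except ValueError:
--             raise ValueError(
--                 f"Keyword '{keyword}' not found in input text: '{text}'")
--
--     inds_to_filter = [ind for ind, word_id in enumerate(
--         word_ids) if word_id in word_inds]
--     return inds_to_filter
-- ===== SOURCE B (Python) =====
-- def _get_ind_to_filter(text: str, word_ids: list, keywords: str) -> list:
--     if not keywords:
--         return list(range(len(word_ids)))
--
--     input_words = text.split()
--     keywords_list = [keyword.strip() for keyword in keywords.split(",")]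
--
--     # One linear pass over the words with a pointer into keywords_list,
--     # instead of a repeated list.index scan per keyword.
--     word_inds = []
--     ki = 0
--     for i, word in enumerate(input_words):
--         if ki < len(keywords_list) and word == keywords_list[ki]:
--             word_inds.append(i)
--             ki += 1
--     if ki < len(keywords_list):
--         raise ValueError(
--             f"Keyword '{keywords_list[ki]}' not found in input text: '{text}'")
--
--     ids = set(word_inds)
--     return [ind for ind, word_id in enumerate(word_ids) if word_id in ids]
-- ===== Notes on version B (the rewrite author's own statement) =====
-- stated objective: alternative
-- what changed: The per-keyword input_words.index(keyword, start) rescans are replaced by one linear pass over enumerate(input_words) with a pointer into keywords_list, and the final membership test uses a set built once; Pre_ excludes the inputs where A raises ValueError (some keyword not greedily matchable, i.e. the stripped keyword list is not a subsequence of text.split()).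
import Mathlib
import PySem

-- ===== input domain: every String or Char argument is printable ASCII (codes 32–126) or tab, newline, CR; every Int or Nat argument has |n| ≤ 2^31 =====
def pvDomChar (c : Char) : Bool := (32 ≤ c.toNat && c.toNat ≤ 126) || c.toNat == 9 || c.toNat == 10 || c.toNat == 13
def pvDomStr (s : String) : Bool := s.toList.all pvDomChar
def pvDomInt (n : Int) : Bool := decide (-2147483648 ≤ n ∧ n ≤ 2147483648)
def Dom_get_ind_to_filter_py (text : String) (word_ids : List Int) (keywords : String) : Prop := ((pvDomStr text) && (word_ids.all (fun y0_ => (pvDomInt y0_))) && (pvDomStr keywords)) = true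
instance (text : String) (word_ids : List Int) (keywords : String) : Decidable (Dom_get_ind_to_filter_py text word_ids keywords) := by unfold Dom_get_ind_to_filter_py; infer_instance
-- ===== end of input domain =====

-- B replaces A's per-keyword list.index rescans by one linear pass with a pointer into the
-- keyword list (and a set for the final membership test): a different algorithm, same return value on Pre_.

-- [keyword.strip() for keyword in keywords.split(",")] — shared parsing of both versions
-- (split? is none only for sep = "", so getD [] is never taken with sep ",").
def pvKeywordsList (keywords : String) : List String :=
  ((PySem.Str.split? keywords ",").getD []).map PySem.Str.strip

-- ===== PORT A =====
-- input_words.index(keyword, start): first index ≥ start holding keyword (exact for 0 ≤ start,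
-- which A guarantees); none = ValueError.
def pvIndexFrom? (xs : List String) (v : String) (start : Nat) : Option Nat :=
  ((xs.drop start).idxOf? v).map (· + start)

-- A's `for keyword in keywords_list` loop over state word_inds; start is 0 if word_inds is
-- empty else word_inds[-1] + 1 (xs[-1] of a nonempty list = its last element); none = the
-- ValueError path.
def pvALoop (input_words : List String) : List String → List Nat → Option (List Nat)
  | [], word_inds => some word_inds
  | keyword :: rest, word_inds =>
    let start : Nat := match word_inds.getLast? with
      | none => 0
      | some l => l + 1
    match pvIndexFrom? input_words keyword start with
    | none => none
    | some ind => pvALoop input_words rest (word_inds ++ [ind])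

def get_ind_to_filter_py (text : String) (word_ids : List Int) (keywords : String) : List Int :=
  if keywords = "" then PySem.List.pyRange 0 word_ids.length 1
  else
    let input_words := PySem.Str.split₀ text
    match pvALoop input_words (pvKeywordsList keywords) [] with
    | none => []  -- ValueError: excluded by Pre_get_ind_to_filter_py
    | some word_inds =>
      (PySem.List.enumerate word_ids 0).filterMap
        (fun p => if word_inds.any (fun i => (i : Int) == p.2) then some p.1 else none)

-- ===== PORT B =====
-- B's single enumerate pass: index i, remaining keywords (the pointer ki as the suffix
-- keywords_list[ki:]), accumulated word_inds; returns (word_inds, remaining keywords).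
def pvBPass : Nat → List String → List String → List Int → List Int × List String
  | _, [], kws, acc => (acc, kws)
  | i, _ :: ws, [], acc => pvBPass (i + 1) ws [] acc
  | i, w :: ws, k :: kr, acc =>
    if w = k then pvBPass (i + 1) ws kr (acc ++ [(i : Int)])
    else pvBPass (i + 1) ws (k :: kr) acc

def get_ind_to_filter_py_alt (text : String) (word_ids : List Int) (keywords : String) : List Int :=
  if keywords = "" then PySem.List.pyRange 0 word_ids.length 1
  else
    let input_words := PySem.Str.split₀ text
    let r := pvBPass 0 input_words (pvKeywordsList keywords) []
    if r.2 = [] then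
      let ids := PySem.Set.ofList r.1
      (PySem.List.enumerate word_ids 0).filterMap
        (fun p => if PySem.Set.contains ids p.2 then some p.1 else none)
    else []  -- ValueError: excluded by Pre_get_ind_to_filter_py

-- ===== PRECONDITION & SPEC =====
-- Pre_ excludes exactly the inputs on which A raises ValueError: with nonempty keywords, A
-- returns iff the stripped keyword list is (in order) a subsequence of text.split().
def Pre_get_ind_to_filter_py (text : String) (word_ids : List Int) (keywords : String) : Prop :=
  keywords = "" ∨ List.Sublist (pvKeywordsList keywords) (PySem.Str.split₀ text)
instance (text : String) (word_ids : List Int) (keywords : String) : Decidable (Pre_get_ind_to_filter_py text word_ids keywords) := by unfold Pre_get_ind_to_filter_py; infer_instance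

def pvWitness_get_ind_to_filter_py : String × List Int × String := ("a b c", [0, 2, 5], "a, c")

def Spec_get_ind_to_filter_py (text : String) (word_ids : List Int) (keywords : String) (out : List Int) : Prop := out = get_ind_to_filter_py_alt text word_ids keywords
instance (text : String) (word_ids : List Int) (keywords : String) (out : List Int) : Decidable (Spec_get_ind_to_filter_py text word_ids keywords out) := by unfold Spec_get_ind_to_filter_py; infer_instance

-- ===== CLAIM (what is proved, stated in full; the proofs are below) =====
def Claim_equal_get_ind_to_filter_py : Prop := ∀ (text : String) (word_ids : List Int) (keywords : String), Dom_get_ind_to_filter_py text word_ids keywords → Pre_get_ind_to_filter_py text word_ids keywords → Spec_get_ind_to_filter_py text word_ids keywords (get_ind_to_filter_py text word_ids keywords)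

-- ===== LEMMAS AND PROOFS =====

-- The greedy left-to-right matching both loops implement, as absolute indices.
def pvGreedy : List String → List String → Nat → Option (List Nat)
  | _, [], _ => some []
  | [], _ :: _, _ => none
  | w :: ws, k :: kr, j =>
    if w = k then (pvGreedy ws kr (j + 1)).map (j :: ·)
    else pvGreedy ws (k :: kr) (j + 1)

theorem pvGreedy_nil (ws : List String) (j : Nat) : pvGreedy ws [] j = some [] := by
  cases ws <;> rfl

theorem pvGreedy_of_sublist (ws kws : List String) (j : Nat) (h : List.Sublist kws ws) :
    ∃ l, pvGreedy ws kws j = some l := by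
  induction ws generalizing kws j with
  | nil =>
    cases kws with
    | nil => exact ⟨[], rfl⟩
    | cons k kr => cases h
  | cons w ws ih =>
    cases kws with
    | nil => exact ⟨[], pvGreedy_nil _ _⟩
    | cons k kr =>
      by_cases hw : w = k
      · have hkr : List.Sublist kr ws := by
          cases h with
          | cons _ h' => exact (List.sublist_cons_self k kr).trans h'
          | cons₂ _ h' => exact h'
        obtain ⟨l, hl⟩ := ih kr (j + 1) hkr
        exact ⟨j :: l, by simp [pvGreedy, hw, hl]⟩
      · have hks : List.Sublist (k :: kr) ws := by
          cases h with
          | cons _ h' => exact h'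
          | cons₂ _ h' => exact absurd rfl hw
        obtain ⟨l, hl⟩ := ih (k :: kr) (j + 1) hks
        exact ⟨l, by simp [pvGreedy, hw, hl]⟩

theorem pvGreedy_idxOf (ws : List String) (k : String) (kr : List String) (j : Nat) :
    pvGreedy ws (k :: kr) j =
      match ws.idxOf? k with
      | none => none
      | some i => (pvGreedy (ws.drop (i + 1)) kr (j + i + 1)).map ((j + i) :: ·) := by
  induction ws generalizing j with
  | nil => simp [pvGreedy, List.idxOf?]
  | cons w ws ih =>
    rw [List.idxOf?_cons]
    by_cases hw : w = k
    · subst hw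
      simp [pvGreedy]
    · rw [pvGreedy, if_neg hw, ih (j + 1)]
      simp only [beq_iff_eq, if_neg hw]
      cases hix : ws.idxOf? k with
      | none => simp
      | some i =>
        simp only [Option.map_some]
        have h1 : j + 1 + i = j + (i + 1) := by omega
        rw [h1]
        rfl

theorem pvALoop_eq_greedy (words : List String) (kws : List String) (acc : List Nat) (s : Nat)
    (hs : (match acc.getLast? with | none => 0 | some l => l + 1) = s) :
    pvALoop words kws acc = (pvGreedy (words.drop s) kws s).map (acc ++ ·) := by
  induction kws generalizing acc s with
  | nil => simp [pvALoop, pvGreedy_nil]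
  | cons k kr ih =>
    rw [pvALoop, pvGreedy_idxOf]
    simp only [hs, pvIndexFrom?]
    cases hix : (words.drop s).idxOf? k with
    | none => simp
    | some i =>
      simp only [Option.map_some]
      have hstep : pvALoop words kr (acc ++ [i + s]) =
          (pvGreedy (words.drop (i + s + 1)) kr (i + s + 1)).map ((acc ++ [i + s]) ++ ·) := by
        have h := ih (acc ++ [i + s]) (i + s + 1) (by simp)
        exact h
      rw [hstep]
      have h1 : s + i = i + s := by omega
      have h2 : (words.drop s).drop (i + 1) = words.drop (i + s + 1) := by
        rw [List.drop_drop]; congr 1; omega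
      rw [h1, h2]
      cases pvGreedy (words.drop (i + s + 1)) kr (i + s + 1) with
      | none => rfl
      | some t => simp

theorem pvBPass_eq_greedy (ws : List String) (kws : List String) (j : Nat) (acc : List Int)
    (l : List Nat) (hg : pvGreedy ws kws j = some l) :
    pvBPass j ws kws acc = (acc ++ l.map (Int.ofNat), []) := by
  induction ws generalizing kws j acc l with
  | nil =>
    cases kws with
    | nil => simp [pvGreedy] at hg; simp [pvBPass, ← hg]
    | cons k kr => simp [pvGreedy] at hg
  | cons w ws ih =>
    cases kws with
    | nil =>
      rw [pvGreedy_nil] at hg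
      simp only [Option.some.injEq] at hg
      rw [pvBPass, ih [] (j + 1) acc [] (pvGreedy_nil _ _)]
      simp [← hg]
    | cons k kr =>
      by_cases hw : w = k
      · rw [pvGreedy, if_pos hw] at hg
        cases hgt : pvGreedy ws kr (j + 1) with
        | none => rw [hgt] at hg; simp at hg
        | some t =>
          rw [hgt] at hg
          simp only [Option.map_some, Option.some.injEq] at hg
          rw [pvBPass]
          simp only [if_pos hw]
          rw [ih kr (j + 1) (acc ++ [(j : Int)]) t hgt, ← hg]
          simp
      · rw [pvGreedy, if_neg hw] at hg
        rw [pvBPass]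
        simp only [if_neg hw]
        exact ih (k :: kr) (j + 1) acc l hg

theorem pv_membership_eq (l : List Nat) (x : Int) :
    (l.any (fun i => (i : Int) == x)) = PySem.Set.contains (PySem.Set.ofList (l.map Int.ofNat)) x := by
  rw [Bool.eq_iff_iff, PySem.Set.contains, List.contains_eq_mem, List.any_eq_true,
    decide_eq_true_iff, PySem.Set.mem_ofList, List.mem_map]
  constructor
  · rintro ⟨i, hi, hb⟩; exact ⟨i, hi, eq_of_beq hb⟩
  · rintro ⟨i, hi, hb⟩; exact ⟨i, hi, beq_iff_eq.mpr hb⟩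

-- ===== VERDICT (by name: the statement is the Claim_ definition above) =====
theorem get_ind_to_filter_py_spec : Claim_equal_get_ind_to_filter_py := by
  intro text word_ids keywords _dom hpre
  unfold Spec_get_ind_to_filter_py get_ind_to_filter_py get_ind_to_filter_py_alt
  by_cases hk : keywords = ""
  · simp [hk]
  · rcases hpre with hpre | hpre
    · exact absurd hpre hk
    simp only [if_neg hk]
    obtain ⟨l, hg⟩ := pvGreedy_of_sublist _ _ 0 hpre
    have hA := pvALoop_eq_greedy (PySem.Str.split₀ text) (pvKeywordsList keywords) [] 0 rfl
    rw [List.drop_zero, hg] at hA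
    have hB := pvBPass_eq_greedy (PySem.Str.split₀ text) (pvKeywordsList keywords) 0 [] l hg
    simp only [List.nil_append] at hA hB
    rw [hA, hB]
    simp only [Option.map_some]
    congr 1
    funext p
    rw [pv_membership_eq l p.2]
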